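-- pv_equiv track=rewrite | github.com/junghoonk95/Algorithm | sktflyai/3주차/4)동전 0/동전 0_강두원.py | solution
-- ===== SOURCE A (Python) =====
-- def solution(N, K, A):
--     A.sort(reverse=True)
--     answer = 0
--     for a in A:
--         while K >= a:
--             answer += 1
--             K -= a
--
--     return answer
-- ===== SOURCE B (Python) =====
-- def solution(N, K, A):
--     answer = 0
--     for a in sorted(A, reverse=True):
--         if K >= a:
--             answer += K // a
--             K %= a
--     return answer
-- ===== Notes on version B (the rewrite author's own statement) =====
-- stated objective: faster
-- what changed: B replaces A's inner repeated-subtraction while-loop by one integer division/modulo per coin (answer += K//a; K %= a); intended as asymptotically faster — a timing run could not measure a ratio because A already timed out at n=16 where B returned instantly. B also does not mutate A in place (equivalence is about the return value only).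
import Mathlib
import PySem

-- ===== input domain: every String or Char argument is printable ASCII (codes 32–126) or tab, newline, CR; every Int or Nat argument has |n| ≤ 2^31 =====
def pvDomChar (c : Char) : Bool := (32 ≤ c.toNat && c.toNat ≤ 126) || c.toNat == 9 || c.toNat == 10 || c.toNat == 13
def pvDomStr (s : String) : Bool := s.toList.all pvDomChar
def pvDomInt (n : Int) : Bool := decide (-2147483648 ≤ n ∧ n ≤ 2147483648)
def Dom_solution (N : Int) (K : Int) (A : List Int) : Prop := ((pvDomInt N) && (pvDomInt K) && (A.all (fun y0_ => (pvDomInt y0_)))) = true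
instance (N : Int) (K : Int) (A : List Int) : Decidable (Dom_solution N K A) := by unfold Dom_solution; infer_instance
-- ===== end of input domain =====

-- B replaces A's inner repeated subtraction by one integer division/modulo per coin -- intended
-- as faster (a timing run saw A time out at n=16 where B returned, but could measure no ratio).
-- A sorts its argument list in place; B does not mutate it — the equivalence proved here is about the return value only.

-- ===== PORT A =====
-- the 'while K >= a: answer += 1; K -= a' loop of A; the '0 < a' test only makes the
-- recursion total: Python loops forever when a ≤ 0 and K ≥ a (excluded by Pre_solution)
def pvWhileSub (a K ans : Int) : Int × Int :=
  if h : K ≥ a ∧ 0 < a then pvWhileSub a (K - a) (ans + 1) else (K, ans)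
termination_by K.toNat
decreasing_by omega

def solution (N : Int) (K : Int) (A : List Int) : Int :=
  -- A.sort(reverse=True); answer = 0; for a in A: while K >= a: answer += 1; K -= a
  ((PySem.List.sorted A (fun x => x) true).foldl
      (fun (s : Int × Int) a => pvWhileSub a s.1 s.2) (K, 0)).2

-- ===== PORT B =====
def solution_alt (N : Int) (K : Int) (A : List Int) : Int :=
  -- answer = 0; for a in sorted(A, reverse=True): if K >= a: answer += K // a; K %= a
  ((PySem.List.sorted A (fun x => x) true).foldl
      (fun (s : Int × Int) a =>
        if s.1 ≥ a then (PySem.Int.mod s.1 a, s.2 + PySem.Int.floordiv s.1 a) else s)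
      (K, 0)).2

-- ===== PRECONDITION & SPEC =====
-- Pre_ holds exactly when A terminates: as soon as some coin a ≤ 0 is reached with the
-- running remainder ≥ a, A's while-loop never ends (and a = 0 would make B divide by zero);
-- this is equivalent to the closed-form condition that K is below every nonpositive coin.
def Pre_solution (N : Int) (K : Int) (A : List Int) : Prop := ∀ a ∈ A, a ≤ 0 → K < a
instance (N : Int) (K : Int) (A : List Int) : Decidable (Pre_solution N K A) := by
  unfold Pre_solution; infer_instance
def pvWitness_solution : Int × Int × List Int := (3, 11, [1, 5, 2])
def Spec_solution (N : Int) (K : Int) (A : List Int) (out : Int) : Prop := out = solution_alt N K A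
instance (N : Int) (K : Int) (A : List Int) (out : Int) : Decidable (Spec_solution N K A out) := by unfold Spec_solution; infer_instance

-- ===== CLAIM (what is proved, stated in full; the proofs are below) =====
def Claim_equal_solution : Prop := ∀ (N : Int) (K : Int) (A : List Int), Dom_solution N K A → Pre_solution N K A → Spec_solution N K A (solution N K A)

-- ===== LEMMAS AND PROOFS =====

-- A's while-loop computes the quotient/remainder in one step, for a positive coin.
theorem pvWhileSub_eq (a : Int) (ha : 0 < a) :
    ∀ (n : Nat) (K ans : Int), K.toNat ≤ n →
      pvWhileSub a K ans =
        if K ≥ a then (PySem.Int.mod K a, ans + PySem.Int.floordiv K a) else (K, ans) := by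
  intro n
  induction n with
  | zero =>
      intro K ans hK
      rw [pvWhileSub]
      have : ¬ (K ≥ a) := by omega
      simp [this]
  | succ m ih =>
      intro K ans hK
      rw [pvWhileSub]
      by_cases hKa : K ≥ a
      · have hmod : PySem.Int.mod K a = PySem.Int.mod (K - a) a := by
          rw [PySem.Int.mod_eq_emod_of_pos ha, PySem.Int.mod_eq_emod_of_pos ha,
            Int.sub_emod_right]
        have hdiv : PySem.Int.floordiv K a = PySem.Int.floordiv (K - a) a + 1 := by
          rw [PySem.Int.floordiv_eq_ediv_of_pos ha, PySem.Int.floordiv_eq_ediv_of_pos ha]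
          have h3 : K - a = K + (-1) * a := by ring
          rw [h3, Int.add_mul_ediv_right _ _ (by omega : a ≠ 0)]
          ring
        simp only [hKa, ha, and_true, dif_pos]
        rw [ih (K - a) (ans + 1) (by omega)]
        by_cases h2 : K - a ≥ a
        · simp [h2, hmod, hdiv]; ring
        · have hm : PySem.Int.mod K a = K - a := by
            rw [hmod, PySem.Int.mod_eq_emod_of_pos ha]
            exact Int.emod_eq_of_lt (by omega) (by omega)
          have hd : PySem.Int.floordiv K a = 1 := by
            rw [hdiv, PySem.Int.floordiv_eq_ediv_of_pos ha,
              Int.ediv_eq_zero_of_lt (by omega) (by omega)]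
            omega
          simp [h2, hm, hd]
      · have : ¬ (K ≥ a ∧ 0 < a) := by omega
        simp [hKa]

-- The two folds agree step by step: every nonpositive coin stays above the running
-- remainder (it only decreases), so both sides skip it; positive coins use pvWhileSub_eq.
theorem fold_eq (K0 : Int) (l : List Int) :
    ∀ (K ans : Int), K ≤ K0 → (∀ a ∈ l, a ≤ 0 → K0 < a) →
      l.foldl (fun (s : Int × Int) a => pvWhileSub a s.1 s.2) (K, ans) =
      l.foldl (fun (s : Int × Int) a =>
        if s.1 ≥ a then (PySem.Int.mod s.1 a, s.2 + PySem.Int.floordiv s.1 a) else s)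
        (K, ans) := by
  induction l with
  | nil => intro K ans _ _; rfl
  | cons a t ih =>
      intro K ans hle hpre
      by_cases ha : 0 < a
      · simp only [List.foldl]
        rw [pvWhileSub_eq a ha K.toNat K ans le_rfl]
        by_cases hKa : K ≥ a
        · simp only [hKa, if_pos]
          refine ih _ _ ?_ (fun b hb => hpre b (List.mem_cons_of_mem _ hb))
          have := PySem.Int.mod_lt (a := K) ha
          omega
        · simp only [hKa, if_false]
          exact ih _ _ hle (fun b hb => hpre b (List.mem_cons_of_mem _ hb))
      · have hKlt : K < a := by
          have := hpre a (List.mem_cons_self ..) (by omega)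
          omega
        have hskip : ¬ (K ≥ a) := by omega
        simp only [List.foldl]
        rw [pvWhileSub]
        simp only [hskip, false_and, dif_neg, not_false_iff, if_neg]
        exact ih _ _ hle (fun b hb => hpre b (List.mem_cons_of_mem _ hb))

-- ===== VERDICT (by name: the statement is the Claim_ definition above) =====
theorem solution_spec : Claim_equal_solution := by
  intro N K A _ hpre
  unfold Spec_solution solution solution_alt
  refine congrArg Prod.snd ?_
  exact fold_eq K _ K 0 le_rfl
    (fun a ha => hpre a ((PySem.List.mem_sorted _ _ _ _).1 ha))
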